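-- pv_equiv track=rewrite | github.com/ZakirCodeArchitect/PakistanHigherCourtsSearchAndQASystem | backend/law_information_project/law_information/management/commands/extract_detailed_law_info.py | generate_generic_jurisdiction
-- ===== SOURCE A (Python) =====
-- def generate_generic_jurisdiction(law_title):
--     """Generate generic jurisdiction based on law title"""
--     title_lower = law_title.lower()
--
--     if any(word in title_lower for word in ['murder', 'rape', 'terrorism', 'narcotics', 'blasphemy']):
--         return "Sessions Court/High Court"
--     elif any(word in title_lower for word in ['theft', 'fraud', 'assault', 'hurt', 'breach']):
--         return "Magistrate/Sessions Court"
--     elif any(word in title_lower for word in ['family', 'marriage', 'divorce']):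
--         return "Family Court"
--     elif any(word in title_lower for word in ['labor', 'employment', 'worker']):
--         return "Labor Court"
--     elif any(word in title_lower for word in ['civil', 'contract', 'property']):
--         return "Civil Court"
--     elif any(word in title_lower for word in ['tax', 'revenue', 'customs']):
--         return "Tax Tribunal/Revenue Court"
--     elif any(word in title_lower for word in ['banking', 'finance', 'companies']):
--         return "Banking Court/Commercial Court"
--     elif any(word in title_lower for word in ['environment', 'pollution']):
--         return "Environmental Tribunal"
--     else:
--         return "Relevant Court as per law"
-- ===== SOURCE B (Python) =====
-- # Flat keyword->(priority, court) ranking: collect ALL matching keywords and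
-- # return the court of the best-ranked (lowest priority) match.
-- FLAT_RULES = [
--     ('murder', "Sessions Court/High Court"),
--     ('rape', "Sessions Court/High Court"),
--     ('terrorism', "Sessions Court/High Court"),
--     ('narcotics', "Sessions Court/High Court"),
--     ('blasphemy', "Sessions Court/High Court"),
--     ('theft', "Magistrate/Sessions Court"),
--     ('fraud', "Magistrate/Sessions Court"),
--     ('assault', "Magistrate/Sessions Court"),
--     ('hurt', "Magistrate/Sessions Court"),
--     ('breach', "Magistrate/Sessions Court"),
--     ('family', "Family Court"),
--     ('marriage', "Family Court"),
--     ('divorce', "Family Court"),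
--     ('labor', "Labor Court"),
--     ('employment', "Labor Court"),
--     ('worker', "Labor Court"),
--     ('civil', "Civil Court"),
--     ('contract', "Civil Court"),
--     ('property', "Civil Court"),
--     ('tax', "Tax Tribunal/Revenue Court"),
--     ('revenue', "Tax Tribunal/Revenue Court"),
--     ('customs', "Tax Tribunal/Revenue Court"),
--     ('banking', "Banking Court/Commercial Court"),
--     ('finance', "Banking Court/Commercial Court"),
--     ('companies', "Banking Court/Commercial Court"),
--     ('environment', "Environmental Tribunal"),
--     ('pollution', "Environmental Tribunal"),
-- ]
--
-- def generate_generic_jurisdiction(law_title):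
--     """Generate generic jurisdiction based on law title"""
--     title_lower = law_title.lower()
--     hits = [(rank, court) for rank, (word, court) in enumerate(FLAT_RULES)
--             if word in title_lower]
--     if not hits:
--         return "Relevant Court as per law"
--     return min(hits, key=lambda h: h[0])[1]
-- ===== Notes on version B (the rewrite author's own statement) =====
-- stated objective: alternative
-- what changed: Instead of an eight-branch first-match if/elif ladder over keyword groups, B flattens all 27 keywords into one ranked (rank, court) table, collects every keyword that occurs in the lowered title, and returns the court of the minimum-rank hit (default if no hits).
import Mathlib
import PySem

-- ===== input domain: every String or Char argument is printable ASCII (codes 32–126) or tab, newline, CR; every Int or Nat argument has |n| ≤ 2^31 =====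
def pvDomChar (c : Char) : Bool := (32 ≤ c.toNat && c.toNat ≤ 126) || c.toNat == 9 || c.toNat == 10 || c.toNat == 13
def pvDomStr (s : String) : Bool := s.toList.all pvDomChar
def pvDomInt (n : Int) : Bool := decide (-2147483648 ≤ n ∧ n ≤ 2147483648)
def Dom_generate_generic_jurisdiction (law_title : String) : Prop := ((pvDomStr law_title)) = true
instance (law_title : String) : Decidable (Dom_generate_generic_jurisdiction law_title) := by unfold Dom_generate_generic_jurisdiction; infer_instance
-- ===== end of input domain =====

-- B replaces A's eight-branch keyword ladder by a flat ranked keyword table: it collects ALL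
-- matching keywords with their rank and returns the court of the minimum-rank hit (objective: alternative).

-- ===== PORT A =====
def generate_generic_jurisdiction (law_title : String) : String :=
  let title_lower := PySem.Str.lower law_title
  if ["murder", "rape", "terrorism", "narcotics", "blasphemy"].any (fun w => PySem.Str.isIn w title_lower) then
    "Sessions Court/High Court"
  else if ["theft", "fraud", "assault", "hurt", "breach"].any (fun w => PySem.Str.isIn w title_lower) then
    "Magistrate/Sessions Court"
  else if ["family", "marriage", "divorce"].any (fun w => PySem.Str.isIn w title_lower) then
    "Family Court"
  else if ["labor", "employment", "worker"].any (fun w => PySem.Str.isIn w title_lower) then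
    "Labor Court"
  else if ["civil", "contract", "property"].any (fun w => PySem.Str.isIn w title_lower) then
    "Civil Court"
  else if ["tax", "revenue", "customs"].any (fun w => PySem.Str.isIn w title_lower) then
    "Tax Tribunal/Revenue Court"
  else if ["banking", "finance", "companies"].any (fun w => PySem.Str.isIn w title_lower) then
    "Banking Court/Commercial Court"
  else if ["environment", "pollution"].any (fun w => PySem.Str.isIn w title_lower) then
    "Environmental Tribunal"
  else
    "Relevant Court as per law"

-- ===== PORT B =====
def pvFlatRules : List (String × String) :=
  [ ("murder", "Sessions Court/High Court")
  , ("rape", "Sessions Court/High Court")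
  , ("terrorism", "Sessions Court/High Court")
  , ("narcotics", "Sessions Court/High Court")
  , ("blasphemy", "Sessions Court/High Court")
  , ("theft", "Magistrate/Sessions Court")
  , ("fraud", "Magistrate/Sessions Court")
  , ("assault", "Magistrate/Sessions Court")
  , ("hurt", "Magistrate/Sessions Court")
  , ("breach", "Magistrate/Sessions Court")
  , ("family", "Family Court")
  , ("marriage", "Family Court")
  , ("divorce", "Family Court")
  , ("labor", "Labor Court")
  , ("employment", "Labor Court")
  , ("worker", "Labor Court")
  , ("civil", "Civil Court")
  , ("contract", "Civil Court")
  , ("property", "Civil Court")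
  , ("tax", "Tax Tribunal/Revenue Court")
  , ("revenue", "Tax Tribunal/Revenue Court")
  , ("customs", "Tax Tribunal/Revenue Court")
  , ("banking", "Banking Court/Commercial Court")
  , ("finance", "Banking Court/Commercial Court")
  , ("companies", "Banking Court/Commercial Court")
  , ("environment", "Environmental Tribunal")
  , ("pollution", "Environmental Tribunal") ]

def generate_generic_jurisdiction_alt (law_title : String) : String :=
  let title_lower := PySem.Str.lower law_title
  let hits := ((PySem.List.enumerate pvFlatRules 0).filter
                (fun p => PySem.Str.isIn p.2.1 title_lower)).map (fun p => (p.1, p.2.2))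
  match PySem.List.min? hits (fun h => h.1) with
  | none => "Relevant Court as per law"
  | some h => h.2

-- ===== PRECONDITION & SPEC =====
def Spec_generate_generic_jurisdiction (law_title : String) (out : String) : Prop := out = generate_generic_jurisdiction_alt law_title
instance (law_title : String) (out : String) : Decidable (Spec_generate_generic_jurisdiction law_title out) := by unfold Spec_generate_generic_jurisdiction; infer_instance

-- ===== CLAIM (what is proved, stated in full; the proofs are below) =====
def Claim_equal_generate_generic_jurisdiction : Prop := ∀ (law_title : String), Dom_generate_generic_jurisdiction law_title → Spec_generate_generic_jurisdiction law_title (generate_generic_jurisdiction law_title)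

-- ===== LEMMAS AND PROOFS =====

-- the min of a list whose key is strictly increasing is its head
theorem pv_min?_pairwise {α κ : Type} [LinearOrder κ] (l : List α) (key : α → κ)
    (hp : l.Pairwise (fun a b => key a < key b)) :
    PySem.List.min? l key = l.head? := by
  cases l with
  | nil => exact (PySem.List.min?_eq_none_iff _ _).mpr rfl
  | cons a t =>
    rcases h : PySem.List.min? (a :: t) key with _ | m
    · exact absurd ((PySem.List.min?_eq_none_iff _ _).mp h) (by simp)
    · have hmem := PySem.List.min?_mem h
      have hmin := PySem.List.min?_isMin h a (by simp)
      rcases List.mem_cons.mp hmem with rfl | hmt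
      · rfl
      · have := (List.pairwise_cons.mp hp).1 m hmt
        exact absurd hmin (not_le.mpr this)

-- the first-match recursion B's filtered/ranked list is compared against
def pvFirstMatch (t : String) : List (String × String) → Option String
  | [] => none
  | (w, c) :: r => if PySem.Str.isIn w t then some c else pvFirstMatch t r

theorem pv_head_hits (t : String) : ∀ (rules : List (String × String)) (k : Int),
    ((((PySem.List.enumerate rules k).filter (fun p => PySem.Str.isIn p.2.1 t)).map
        (fun p => (p.1, p.2.2))).head?).map (fun h => h.2) = pvFirstMatch t rules := by
  intro rules
  induction rules with
  | nil => intro k; simp [PySem.List.enumerate_nil, pvFirstMatch]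
  | cons wc r ih =>
    intro k
    obtain ⟨w, c⟩ := wc
    rw [PySem.List.enumerate_cons]
    by_cases h : PySem.Str.isIn w t = true
    · have h' : PySem.Chars.isIn w.toList t.toList = true := by simpa using h
      rw [List.filter_cons_of_pos (by simpa using h)]
      simp [pvFirstMatch, h']
    · rw [List.filter_cons_of_neg (by simpa using h)]
      simp only [pvFirstMatch]
      rw [if_neg h]
      exact ih (k + 1)

theorem pv_hits_pairwise (t : String) (rules : List (String × String)) (k : Int) :
    (((PySem.List.enumerate rules k).filter (fun p => PySem.Str.isIn p.2.1 t)).map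
      (fun p => (p.1, p.2.2))).Pairwise (fun a b => a.1 < b.1) := by
  rw [List.pairwise_map]
  exact (PySem.List.pairwise_lt_enumerate rules k).filter _

theorem pv_ite_orb {α : Type} (x y : Bool) (a b : α) :
    (if (x || y) then a else b) = if x then a else if y then a else b := by
  cases x <;> cases y <;> rfl

theorem pv_getD_ite {α : Type} (c : Prop) [Decidable c] (x : α) (o : Option α) (d : α) :
    (if c then some x else o).getD d = if c then x else o.getD d := by
  by_cases c <;> simp [*]

-- B's value is the first-match value over the flat table
theorem pv_alt_eq (law_title : String) :
    generate_generic_jurisdiction_alt law_title =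
      (pvFirstMatch (PySem.Str.lower law_title) pvFlatRules).getD "Relevant Court as per law" := by
  simp only [generate_generic_jurisdiction_alt]
  rw [pv_min?_pairwise _ _ (pv_hits_pairwise (PySem.Str.lower law_title) pvFlatRules 0),
    ← pv_head_hits (PySem.Str.lower law_title) pvFlatRules 0]
  generalize (List.map (fun p => (p.1, p.2.2))
      (List.filter (fun p => PySem.Str.isIn p.2.1 (PySem.Str.lower law_title))
        (PySem.List.enumerate pvFlatRules 0))).head? = o
  cases o <;> rfl

-- ===== VERDICT (by name: the statement is the Claim_ definition above) =====
theorem generate_generic_jurisdiction_spec : Claim_equal_generate_generic_jurisdiction := by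
  intro law_title _
  unfold Spec_generate_generic_jurisdiction
  rw [pv_alt_eq]
  unfold generate_generic_jurisdiction pvFlatRules
  simp only [List.any_cons, List.any_nil, Bool.or_false, pvFirstMatch, pv_ite_orb, pv_getD_ite,
    Option.getD_none]
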